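-- pv_equiv track=rewrite | github.com/linhdvu14/cp-sols | sols/CodeForces/1635_d2/E_Cars_.py | solve
-- ===== SOURCE A (Python) =====
-- from collections import deque
-- from types import GeneratorType
--
-- def bootstrap(f, stack=[]):
--     def wrappedfunc(*args, **kwargs):
--         if stack: return f(*args, **kwargs)
--         to = f(*args, **kwargs)
--         while True:
--             if type(to) is GeneratorType:
--                 stack.append(to)
--                 to = next(to)
--             else:
--                 stack.pop()
--                 if not stack: break
--                 to = stack[-1].send(to)
--         return to
--     return wrappedfunc
--
-- def solve(N, M, edges):
--     # t=0 -> head away, t=1 -> head towards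
--     # should form bipartite graph either way
--     adj = [[] for _ in range(N)]
--     for _, u, v in edges:
--         adj[u-1].append(v-1)
--         adj[v-1].append(u-1)
--
--     @bootstrap
--     def dfs(u, c=0, p=-1):
--         color[u] = c
--         ok = True
--         for v in adj[u]:
--             if v == p: continue
--             if color[v] == -1: ok = yield dfs(v, c^1, u)
--             elif color[v] != c^1: ok = False
--             if not ok: break
--         yield ok
--
--     color = [-1] * N
--     for u in range(N):
--         if color[u] == -1 and not dfs(u): return []
--
--     # let 0 stay still, 1 move right
--     # add edge u -> v if v is right of u
--     adj = [[] for _ in range(N)]  # v in adj[u] if there is edge u <- v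
--     deg = [0] * N
--     for t, u, v in edges:
--         u -= 1
--         v -= 1
--         t -= 1
--         if color[u] == t: # u -> v
--             adj[v].append(u)
--             deg[u] += 1
--         else:             # v -> u
--             adj[u].append(v)
--             deg[v] += 1
--
--     # toposort
--     res = [''] * N
--     queue = deque([(u, color[u]) for u in range(N) if deg[u] == 0])
--     i = 0
--     while queue:
--         u, d = queue.popleft()
--         res[u] = 'R ' + str(i) if d % 2 == 0 else 'L ' + str(i)
--         i += 1
--         for v in adj[u]:
--             deg[v] -= 1
--             if deg[v] == 0: queue.append((v, d^1))
--     if i < N: return []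
--     return res
-- ===== SOURCE B (Python) =====
-- from collections import deque
--
-- def solve(N, M, edges):
--     adj = [[] for _ in range(N)]
--     for _, u, v in edges:
--         adj[u-1].append(v-1)
--         adj[v-1].append(u-1)
--
--     # bipartite 2-coloring by iterative DFS with an explicit frame stack
--     # (no generators/trampoline); frames hold (vertex, parent, remaining neighbors)
--     color = [-1] * N
--     for s in range(N):
--         if color[s] != -1:
--             continue
--         color[s] = 0
--         stack = [(s, -1, adj[s])]
--         while stack:
--             u, p, rest = stack[-1]
--             if not rest:
--                 stack.pop()
--                 continue
--             v = rest[0]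
--             stack[-1] = (u, p, rest[1:])
--             if v == p:
--                 continue
--             if color[v] == -1:
--                 color[v] = color[u] ^ 1
--                 stack.append((v, u, adj[v]))
--             elif color[v] == color[u]:
--                 return []
--
--     adj = [[] for _ in range(N)]
--     deg = [0] * N
--     for t, u, v in edges:
--         u -= 1
--         v -= 1
--         t -= 1
--         if color[u] == t:
--             adj[v].append(u)
--             deg[u] += 1
--         else:
--             adj[u].append(v)
--             deg[v] += 1
--
--     res = [''] * N
--     queue = deque([(u, color[u]) for u in range(N) if deg[u] == 0])
--     i = 0
--     while queue:
--         u, d = queue.popleft()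
--         res[u] = 'R ' + str(i) if d % 2 == 0 else 'L ' + str(i)
--         i += 1
--         for v in adj[u]:
--             deg[v] -= 1
--             if deg[v] == 0: queue.append((v, d ^ 1))
--     if i < N: return []
--     return res
-- ===== Notes on version B (the rewrite author's own statement) =====
-- stated objective: simpler
-- what changed: The bipartite 2-coloring phase no longer uses A's generator-trampolined recursive dfs (the 'bootstrap' machinery): B runs an explicit iterative DFS with a stack of (vertex, parent, remaining-neighbors) frames, coloring each newly discovered vertex with the opposite color of its frame vertex and returning [] immediately on a same-color conflict; the graph build and the Kahn toposort phase are unchanged.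
import Mathlib
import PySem

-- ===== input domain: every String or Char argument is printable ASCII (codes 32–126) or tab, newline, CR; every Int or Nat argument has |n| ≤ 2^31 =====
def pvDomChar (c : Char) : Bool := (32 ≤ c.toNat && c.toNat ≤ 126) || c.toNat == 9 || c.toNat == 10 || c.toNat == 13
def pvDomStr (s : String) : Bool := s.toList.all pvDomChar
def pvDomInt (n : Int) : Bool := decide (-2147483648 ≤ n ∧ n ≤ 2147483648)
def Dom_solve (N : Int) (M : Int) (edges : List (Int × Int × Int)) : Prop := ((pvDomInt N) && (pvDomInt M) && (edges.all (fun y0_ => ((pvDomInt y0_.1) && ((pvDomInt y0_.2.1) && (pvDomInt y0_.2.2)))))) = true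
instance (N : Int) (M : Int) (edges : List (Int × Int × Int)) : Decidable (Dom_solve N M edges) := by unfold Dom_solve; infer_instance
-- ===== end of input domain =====

-- B replaces A's generator-trampolined recursive bipartite DFS by an explicit iterative
-- frame-stack DFS (objective: simpler — no bootstrap/generator machinery); the graph build
-- and the toposort phase are unchanged in both versions.

-- ===== PORT A =====
-- shared primitives (both Pythons read/write lists with Python index semantics)
def xor1 (c : Int) : Int := PySem.Int.bxor c 1
def gI (xs : List Int) (i : Int) : Int := PySem.List.pyGetD xs i (-2)
def sI (xs : List Int) (i : Int) (v : Int) : List Int := PySem.List.pySetD xs i v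
def gL (xss : List (List Int)) (i : Int) : List Int := PySem.List.pyGetD xss i []
def sL (xss : List (List Int)) (i : Int) (l : List Int) : List (List Int) := PySem.List.pySetD xss i l

-- 'adj = [[] for _ in range(N)]; for _, u, v in edges: adj[u-1].append(v-1); adj[v-1].append(u-1)'
-- (identical in both Pythons)
def adjBuild (N : Int) (edges : List (Int × Int × Int)) : List (List Int) :=
  edges.foldl (fun adj e =>
    let adj1 := sL adj (e.2.1 - 1) (gL adj (e.2.1 - 1) ++ [e.2.2 - 1])
    sL adj1 (e.2.2 - 1) (gL adj1 (e.2.2 - 1) ++ [e.2.1 - 1]))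
    (List.replicate N.toNat [])

-- A's recursive dfs (the trampoline is a recursion-depth workaround only; ported as plain
-- recursion; the body 'color[u] = c' is inlined at each call site, the loop over adj[u]
-- is this function).  fuel only makes the recursion structural.
def dfsLoop (adj : List (List Int)) : Nat → List Int → List Int → Int → Int → Int → Bool × List Int
  | _, color, [], _, _, _ => (true, color)
  | fuel, color, v :: vs, c, u, p =>
    if v = p then dfsLoop adj fuel color vs c u p
    else if gI color v = -1 then
      match fuel with
      | 0 => (false, color)
      | f + 1 =>
        let r := dfsLoop adj f (sI color v (xor1 c)) (gL adj v) (xor1 c) v u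
        if r.1 then dfsLoop adj (f + 1) r.2 vs c u p else r
    else if gI color v ≠ xor1 c then (false, color)
    else dfsLoop adj fuel color vs c u p
termination_by fuel _ vs _ _ _ => (fuel, vs.length)

-- 'for u in range(N): if color[u] == -1 and not dfs(u): return []'
def phase1A (adj : List (List Int)) (fuel : Nat) : List Int → List Int → Option (List Int)
  | [], color => some color
  | s :: ss, color =>
    if gI color s = -1 then
      let r := dfsLoop adj fuel (sI color s 0) (gL adj s) 0 s (-1)
      if r.1 then phase1A adj fuel ss r.2 else none
    else phase1A adj fuel ss color

-- second graph + indegrees (identical in both Pythons)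
def graphBuild (edges : List (Int × Int × Int)) (color : List Int) (N : Int) :
    List (List Int) × List Int :=
  edges.foldl (fun st e =>
    let u := e.2.1 - 1
    let v := e.2.2 - 1
    let t := e.1 - 1
    if gI color u = t then
      (sL st.1 v (gL st.1 v ++ [u]), sI st.2 u (gI st.2 u + 1))
    else
      (sL st.1 u (gL st.1 u ++ [v]), sI st.2 v (gI st.2 v + 1)))
    (List.replicate N.toNat [], List.replicate N.toNat 0)

-- Kahn toposort loop (identical in both Pythons); fuel only makes the loop structural
def topoLoop (adj2 : List (List Int)) : Nat → List (Int × Int) → List Int → List String → Int → List String × Int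
  | _, [], _, res, i => (res, i)
  | 0, _ :: _, _, res, i => (res, i)
  | f + 1, (u, d) :: q, deg, res, i =>
    let res1 := PySem.List.pySetD res u
      (if PySem.Int.mod d 2 = 0 then "R " ++ PySem.Int.toStr i else "L " ++ PySem.Int.toStr i)
    let st := (gL adj2 u).foldl (fun (st : List Int × List (Int × Int)) v =>
        let deg1 := sI st.1 v (gI st.1 v - 1)
        if gI deg1 v = 0 then (deg1, st.2 ++ [(v, xor1 d)]) else (deg1, st.2)) (deg, q)
    topoLoop adj2 f st.2 st.1 res1 (i + 1)

def phase2 (N : Int) (edges : List (Int × Int × Int)) (color : List Int) : List String :=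
  let g := graphBuild edges color N
  let queue := ((PySem.List.pyRange 0 N 1).filter (fun u => gI g.2 u = 0)).map
    (fun u => (u, gI color u))
  let r := topoLoop g.1 (N.toNat + edges.length + 1) queue g.2 (List.replicate N.toNat "") 0
  if r.2 < N then [] else r.1

def solve (N : Int) (M : Int) (edges : List (Int × Int × Int)) : List String :=
  match phase1A (adjBuild N edges) (N.toNat + 1) (PySem.List.pyRange 0 N 1) (List.replicate N.toNat (-1)) with
  | none => []
  | some color => phase2 N edges color

-- ===== PORT B =====
-- B's iterative DFS: explicit stack of frames (vertex, parent, remaining neighbours);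
-- fuel (consumed only when a new vertex is pushed/coloured) only makes the loop structural
def loopB (adj : List (List Int)) : Nat → List Int → List (Int × Int × List Int) → Option (List Int)
  | _, color, [] => some color
  | fuel, color, (u, p, rest) :: S =>
    match rest with
    | [] => loopB adj fuel color S
    | v :: rest' =>
      if v = p then loopB adj fuel color ((u, p, rest') :: S)
      else if gI color v = -1 then
        match fuel with
        | 0 => none
        | f + 1 => loopB adj f (sI color v (xor1 (gI color u))) ((v, u, gL adj v) :: (u, p, rest') :: S)
      else if gI color v = gI color u then none
      else loopB adj fuel color ((u, p, rest') :: S)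
termination_by fuel _ S => (fuel, (S.map fun fr => fr.2.2.length + 1).sum)

-- 'for s in range(N): if color[s] != -1: continue; color[s] = 0; stack = [(s,-1,adj[s])]; while stack: …'
def phase1B (adj : List (List Int)) (fuel : Nat) : List Int → List Int → Option (List Int)
  | [], color => some color
  | s :: ss, color =>
    if gI color s ≠ -1 then phase1B adj fuel ss color
    else
      match loopB adj fuel (sI color s 0) [(s, -1, gL adj s)] with
      | none => none
      | some color' => phase1B adj fuel ss color'

def solve_alt (N : Int) (M : Int) (edges : List (Int × Int × Int)) : List String :=
  match phase1B (adjBuild N edges) (N.toNat + 1) (PySem.List.pyRange 0 N 1) (List.replicate N.toNat (-1)) with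
  | none => []
  | some color => phase2 N edges color

-- ===== PRECONDITION & SPEC =====
-- Pre_ excludes exactly the inputs where A raises an IndexError: an edge endpoint u (or v)
-- with u-1 outside the Python index range [-N, N-1] of the length-N adjacency list, i.e.
-- u ∉ [1-N, N], makes 'adj[u-1]' raise (for N ≤ 0 any edge raises, and the bounds below are
-- then unsatisfiable).  Endpoints in [1-N, 0] wrap around Python-style; both programs return
-- there and such inputs stay inside Pre_.
def Pre_solve (N : Int) (M : Int) (edges : List (Int × Int × Int)) : Prop :=
  ∀ e ∈ edges, (1 - N ≤ e.2.1 ∧ e.2.1 ≤ N) ∧ (1 - N ≤ e.2.2 ∧ e.2.2 ≤ N)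
instance (N : Int) (M : Int) (edges : List (Int × Int × Int)) : Decidable (Pre_solve N M edges) := by
  unfold Pre_solve; infer_instance

def pvWitness_solve : Int × Int × (List (Int × Int × Int)) := (3, 2, [(1, 1, 2), (2, 2, 3)])

def Spec_solve (N : Int) (M : Int) (edges : List (Int × Int × Int)) (out : List String) : Prop := out = solve_alt N M edges
instance (N : Int) (M : Int) (edges : List (Int × Int × Int)) (out : List String) : Decidable (Spec_solve N M edges out) := by unfold Spec_solve; infer_instance

-- ===== CLAIM (what is proved, stated in full; the proofs are below) =====
def Claim_equal_solve : Prop := ∀ (N : Int) (M : Int) (edges : List (Int × Int × Int)), Dom_solve N M edges → Pre_solve N M edges → Spec_solve N M edges (solve N M edges)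

-- ===== LEMMAS AND PROOFS =====

-- the Nat position a Python index i denotes in a list of length n
def cell (n : Nat) (i : Int) : Nat := if 0 ≤ i then i.toNat else n - (-i).toNat

theorem pyIdx?_inr {n : Nat} {i : Int} (h : PySem.Raise.InRange n i) :
    PySem.List.pyIdx? n i = some (cell n i) := by
  unfold PySem.List.pyIdx? cell
  obtain ⟨h1, h2⟩ := h
  split_ifs with h3 h4 h5 <;> simp_all <;> omega

theorem pyIdx?_ninr {n : Nat} {i : Int} (h : ¬ PySem.Raise.InRange n i) :
    PySem.List.pyIdx? n i = none := by
  unfold PySem.List.pyIdx?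
  unfold PySem.Raise.InRange at h
  split_ifs <;> simp_all <;> omega

theorem cell_lt {n : Nat} {i : Int} (h : PySem.Raise.InRange n i) : cell n i < n := by
  obtain ⟨h1, h2⟩ := h; unfold cell; split_ifs <;> omega

theorem gI_inr {xs : List Int} {i : Int} (h : PySem.Raise.InRange xs.length i) :
    gI xs i = xs.getD (cell xs.length i) (-2) := by
  unfold gI PySem.List.pyGetD PySem.List.pyGet?
  rw [pyIdx?_inr h]
  simp [List.getD_eq_getElem?_getD]

theorem gI_ninr {xs : List Int} {i : Int} (h : ¬ PySem.Raise.InRange xs.length i) :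
    gI xs i = -2 := by
  unfold gI PySem.List.pyGetD PySem.List.pyGet?
  rw [pyIdx?_ninr h]; rfl

theorem gI_inr_of_ne {xs : List Int} {i : Int} (h : gI xs i ≠ -2) :
    PySem.Raise.InRange xs.length i := by
  by_contra hc; exact h (gI_ninr hc)

theorem sI_inr {xs : List Int} {i : Int} {v : Int} (h : PySem.Raise.InRange xs.length i) :
    sI xs i v = xs.set (cell xs.length i) v := by
  unfold sI PySem.List.pySetD PySem.List.pySet?
  rw [pyIdx?_inr h]; rfl

theorem gL_inr {xs : List (List Int)} {i : Int} (h : PySem.Raise.InRange xs.length i) :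
    gL xs i ∈ xs := by
  exact PySem.List.pyGetD_mem _ _ h

theorem gL_ninr {xs : List (List Int)} {i : Int} (h : ¬ PySem.Raise.InRange xs.length i) :
    gL xs i = [] := by
  unfold gL PySem.List.pyGetD PySem.List.pyGet?
  rw [pyIdx?_ninr h]; rfl

theorem getD_set_self {l : List Int} {k : Nat} (hk : k < l.length) (v d : Int) :
    (l.set k v).getD k d = v := by
  simp [List.getD_eq_getElem?_getD, hk]

theorem getD_set_ne {l : List Int} {k j : Nat} (h : k ≠ j) (v d : Int) :
    (l.set k v).getD j d = l.getD j d := by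
  simp [List.getD_eq_getElem?_getD, h]

theorem getD_neg1_lt {l : List Int} {k : Nat} (h : l.getD k (-2) = -1) : k < l.length := by
  by_contra hc
  rw [List.getD_eq_getElem?_getD, List.getElem?_eq_none (by omega)] at h
  simp at h

theorem getD_mem {l : List Int} {k : Nat} (hk : k < l.length) (d : Int) : l.getD k d ∈ l := by
  rw [List.getD_eq_getElem?_getD, List.getElem?_eq_getElem hk]
  exact List.getElem_mem hk

theorem count_pos_of_getD {l : List Int} {k : Nat} (h : l.getD k (-2) = -1) :
    0 < l.count (-1) := by
  have hk := getD_neg1_lt h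
  have := getD_mem hk (-2)
  rw [h] at this
  exact List.count_pos_iff.mpr this

theorem count_set_of_neg1 {l : List Int} {k : Nat} (hv : l.getD k (-2) = -1)
    {x : Int} (hx : x ≠ -1) : (l.set k x).count (-1) + 1 = l.count (-1) := by
  induction l generalizing k with
  | nil => simp [List.getD] at hv
  | cons a t ih =>
    cases k with
    | zero =>
      simp [List.getD] at hv; subst hv
      simp [hx]
    | succ k =>
      simp only [List.getD_cons_succ] at hv
      simp only [List.set_cons_succ, List.count_cons]
      have := ih hv
      omega

theorem count_le_of_mono {l1 l2 : List Int} (hlen : l2.length = l1.length)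
    (h : ∀ k : Nat, l1.getD k (-2) ≠ -1 → l2.getD k (-2) = l1.getD k (-2)) :
    l2.count (-1) ≤ l1.count (-1) := by
  induction l1 generalizing l2 with
  | nil => cases l2 <;> simp_all
  | cons a t ih =>
    cases l2 with
    | nil => simp at hlen
    | cons b t2 =>
      simp only [List.length_cons] at hlen
      have ht := ih (l2 := t2) (by omega) (fun k hk => h (k + 1) hk)
      have h0 := h 0
      simp only [List.getD_cons_zero] at h0
      by_cases ha : a = -1
      · subst ha
        rw [List.count_cons, List.count_cons]
        split <;> simp <;> omega
      · rw [h0 ha]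
        rw [List.count_cons, List.count_cons]
        omega

theorem dfsLoop_nil (adj : List (List Int)) (fuel : Nat) (color : List Int) (c u p : Int) :
    dfsLoop adj fuel color [] c u p = (true, color) := by
  rw [dfsLoop]

theorem dfsLoop_cons_zero (adj : List (List Int)) (color : List Int) (v : Int) (vs : List Int)
    (c u p : Int) :
    dfsLoop adj 0 color (v :: vs) c u p =
      if v = p then dfsLoop adj 0 color vs c u p
      else if gI color v = -1 then (false, color)
      else if gI color v ≠ xor1 c then (false, color)
      else dfsLoop adj 0 color vs c u p := by
  rw [dfsLoop]

theorem dfsLoop_cons_succ (adj : List (List Int)) (f : Nat) (color : List Int) (v : Int)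
    (vs : List Int) (c u p : Int) :
    dfsLoop adj (f + 1) color (v :: vs) c u p =
      if v = p then dfsLoop adj (f + 1) color vs c u p
      else if gI color v = -1 then
        (if (dfsLoop adj f (sI color v (xor1 c)) (gL adj v) (xor1 c) v u).1 then
          dfsLoop adj (f + 1) (dfsLoop adj f (sI color v (xor1 c)) (gL adj v) (xor1 c) v u).2 vs c u p
        else dfsLoop adj f (sI color v (xor1 c)) (gL adj v) (xor1 c) v u)
      else if gI color v ≠ xor1 c then (false, color)
      else dfsLoop adj (f + 1) color vs c u p := by
  rw [dfsLoop]

-- everything dfsLoop guarantees about its result: length preserved, already-coloured cells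
-- unchanged, colours stay in {-1,0,1}
theorem dfsProps (adj : List (List Int)) :
    ∀ fuel vs color (c u p : Int),
    (∀ x ∈ color, x = -1 ∨ x = 0 ∨ x = 1) → (c = 0 ∨ c = 1) →
    (dfsLoop adj fuel color vs c u p).2.length = color.length ∧
    (∀ k : Nat, color.getD k (-2) ≠ -1 →
      (dfsLoop adj fuel color vs c u p).2.getD k (-2) = color.getD k (-2)) ∧
    (∀ x ∈ (dfsLoop adj fuel color vs c u p).2, x = -1 ∨ x = 0 ∨ x = 1) := by
  intro fuel
  induction fuel using Nat.strong_induction_on with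
  | _ fuel IHf =>
  intro vs
  induction vs with
  | nil =>
    intro color c u p hvals hc
    rw [dfsLoop_nil]
    exact ⟨rfl, fun k _ => rfl, hvals⟩
  | cons v vs IHvs =>
    intro color c u p hvals hc
    cases fuel with
    | zero =>
      rw [dfsLoop_cons_zero]
      by_cases hvp : v = p
      · rw [if_pos hvp]; exact IHvs color c u p hvals hc
      · rw [if_neg hvp]
        by_cases hcv : gI color v = -1
        · rw [if_pos hcv]; exact ⟨rfl, fun k _ => rfl, hvals⟩
        · rw [if_neg hcv]
          by_cases hne : gI color v ≠ xor1 c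
          · rw [if_pos hne]; exact ⟨rfl, fun k _ => rfl, hvals⟩
          · rw [if_neg hne]; exact IHvs color c u p hvals hc
    | succ f =>
      rw [dfsLoop_cons_succ]
      by_cases hvp : v = p
      · rw [if_pos hvp]; exact IHvs color c u p hvals hc
      · rw [if_neg hvp]
        by_cases hcv : gI color v = -1
        · rw [if_pos hcv]
          have hinr : PySem.Raise.InRange color.length v := gI_inr_of_ne (by rw [hcv]; decide)
          have hx : xor1 c = 0 ∨ xor1 c = 1 := by
            rcases hc with h | h <;> subst h <;> [right; left] <;> decide
          have hset : sI color v (xor1 c) = color.set (cell color.length v) (xor1 c) :=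
            sI_inr hinr
          have hvals1 : ∀ x ∈ sI color v (xor1 c), x = -1 ∨ x = 0 ∨ x = 1 := by
            intro x hx'
            rw [hset] at hx'
            rcases List.mem_or_eq_of_mem_set hx' with h | h
            · exact hvals x h
            · subst h; rcases hx with h | h <;> rw [h] <;> simp
          have hlen1 : (sI color v (xor1 c)).length = color.length := by
            rw [hset]; simp
          have hcell : color.getD (cell color.length v) (-2) = -1 := by
            rw [← gI_inr hinr]; exact hcv
          obtain ⟨hLa, hMa, hVa⟩ :=
            IHf f (by omega) (gL adj v) (sI color v (xor1 c)) (xor1 c) v u hvals1 hx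
          set r := dfsLoop adj f (sI color v (xor1 c)) (gL adj v) (xor1 c) v u with hrdef
          have hmono1 : ∀ k : Nat, color.getD k (-2) ≠ -1 → r.2.getD k (-2) = color.getD k (-2) := by
            intro k hk
            have hk' : k ≠ cell color.length v := fun h => hk (h ▸ hcell)
            have hs : (sI color v (xor1 c)).getD k (-2) = color.getD k (-2) := by
              rw [hset]; exact getD_set_ne (Ne.symm hk') _ _
            rw [hMa k (by rw [hs]; exact hk), hs]
          have hlenr : r.2.length = color.length := by rw [hLa, hlen1]
          by_cases hr1 : r.1
          · rw [if_pos hr1]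
            obtain ⟨hLb, hMb, hVb⟩ := IHvs r.2 c u p hVa hc
            refine ⟨by rw [hLb, hlenr], ?_, hVb⟩
            intro k hk
            rw [hMb k (by rw [hmono1 k hk]; exact hk), hmono1 k hk]
          · rw [if_neg hr1]
            exact ⟨hlenr, hmono1, hVa⟩
        · rw [if_neg hcv]
          by_cases hne : gI color v ≠ xor1 c
          · rw [if_pos hne]
            exact ⟨rfl, fun k _ => rfl, hvals⟩
          · rw [if_neg hne]
            exact IHvs color c u p hvals hc

theorem gI_set_self {color : List Int} {i : Int} (h : PySem.Raise.InRange color.length i)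
    (x : Int) : gI (color.set (cell color.length i) x) i = x := by
  have h2 : PySem.Raise.InRange (color.set (cell color.length i) x).length i := by simpa using h
  rw [gI_inr h2]
  simp only [List.length_set]
  exact getD_set_self (cell_lt h) x _

-- the simulation: B's frame-stack machine runs A's recursive dfs on the top frame
theorem sim (adj : List (List Int)) (n : Nat)
    (hadj : ∀ l ∈ adj, ∀ x ∈ l, PySem.Raise.InRange n x) :
    ∀ (fA : Nat) (rest : List Int) (color : List Int) (c u p : Int)
      (S : List (Int × Int × List Int)) (fB : Nat),
    color.length = n →
    (∀ x ∈ color, x = -1 ∨ x = 0 ∨ x = 1) →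
    (c = 0 ∨ c = 1) →
    gI color u = c →
    (∀ x ∈ rest, PySem.Raise.InRange n x) →
    color.count (-1) ≤ fA → color.count (-1) ≤ fB →
    loopB adj fB color ((u, p, rest) :: S) =
      (if (dfsLoop adj fA color rest c u p).1 then
        loopB adj (fB - (color.count (-1) - (dfsLoop adj fA color rest c u p).2.count (-1)))
          (dfsLoop adj fA color rest c u p).2 S
      else none) := by
  intro fA
  induction fA using Nat.strong_induction_on with
  | _ fA IHf =>
  intro rest
  induction rest with
  | nil =>
    intro color c u p S fB hlen hvals hc hcu hrest hA hB
    rw [loopB.eq_2, dfsLoop_nil]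
    simp
  | cons v rest' IH =>
    intro color c u p S fB hlen hvals hc hcu hrest hA hB
    have hcne2 : c ≠ -2 := by rcases hc with h | h <;> rw [h] <;> decide
    have hcne1 : c ≠ -1 := by rcases hc with h | h <;> rw [h] <;> decide
    by_cases hvp : v = p
    · -- both versions skip the parent edge
      have hL : loopB adj fB color ((u, p, v :: rest') :: S) =
          loopB adj fB color ((u, p, rest') :: S) := by
        cases fB with
        | zero => rw [loopB.eq_3, if_pos hvp]
        | succ f => rw [loopB.eq_4, if_pos hvp]
      have hR : dfsLoop adj fA color (v :: rest') c u p = dfsLoop adj fA color rest' c u p := by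
        cases fA with
        | zero => rw [dfsLoop_cons_zero, if_pos hvp]
        | succ f => rw [dfsLoop_cons_succ, if_pos hvp]
      rw [hL, hR]
      exact IH color c u p S fB hlen hvals hc hcu (fun x hx => hrest x (List.mem_cons_of_mem _ hx)) hA hB
    · by_cases hcv : gI color v = -1
      · -- v uncoloured: A recurses, B pushes a frame
        have hinr : PySem.Raise.InRange color.length v := gI_inr_of_ne (by rw [hcv]; decide)
        have hcell : color.getD (cell color.length v) (-2) = -1 := by
          rw [← gI_inr hinr]; exact hcv
        have hpos : 0 < color.count (-1) := count_pos_of_getD hcell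
        have hx : xor1 c = 0 ∨ xor1 c = 1 := by
          rcases hc with h | h <;> subst h <;> [right; left] <;> decide
        have hxne : xor1 c ≠ -1 := by rcases hx with h | h <;> rw [h] <;> decide
        cases fA with
        | zero => omega
        | succ a =>
        cases fB with
        | zero => omega
        | succ b =>
        have hset : sI color v (xor1 c) = color.set (cell color.length v) (xor1 c) := sI_inr hinr
        have hvals1 : ∀ x ∈ sI color v (xor1 c), x = -1 ∨ x = 0 ∨ x = 1 := by
          intro x hx'
          rw [hset] at hx'
          rcases List.mem_or_eq_of_mem_set hx' with h | h
          · exact hvals x h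
          · subst h; rcases hx with h | h <;> rw [h] <;> simp
        have hlen1 : (sI color v (xor1 c)).length = color.length := by rw [hset]; simp
        have hcount1 : (sI color v (xor1 c)).count (-1) + 1 = color.count (-1) := by
          rw [hset]; exact count_set_of_neg1 hcell hxne
        have hcu1 : gI (sI color v (xor1 c)) v = xor1 c := by rw [hset]; exact gI_set_self hinr _
        have hrest1 : ∀ x ∈ gL adj v, PySem.Raise.InRange n x := by
          by_cases hav : PySem.Raise.InRange adj.length v
          · exact fun x hx' => hadj _ (gL_inr hav) x hx'
          · rw [gL_ninr hav]; intro x hx'; cases hx'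
        -- A's child call and its properties
        obtain ⟨hLa, hMa, hVa⟩ :=
          dfsProps adj a (gL adj v) (sI color v (xor1 c)) (xor1 c) v u hvals1 hx
        set r1 := dfsLoop adj a (sI color v (xor1 c)) (gL adj v) (xor1 c) v u with hr1def
        have hcnt2 : r1.2.count (-1) ≤ (sI color v (xor1 c)).count (-1) :=
          count_le_of_mono hLa hMa
        -- B runs the pushed frame exactly as A's child call (outer IH at fuel a)
        have hchild := IHf a (by omega) (gL adj v) (sI color v (xor1 c)) (xor1 c) v u
          ((u, p, rest') :: S) b (by rw [hlen1]; exact hlen) hvals1 hx hcu1 hrest1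
          (by omega) (by omega)
        rw [loopB.eq_4, if_neg hvp, if_pos hcv, hcu, hchild]
        rw [dfsLoop_cons_succ, if_neg hvp, if_pos hcv]
        rw [← hr1def]
        by_cases hr1 : r1.1
        · rw [if_pos hr1, if_pos hr1]
          -- the u-cell is untouched by the child call
          have hku_inr : PySem.Raise.InRange color.length u := gI_inr_of_ne (by rw [hcu]; exact hcne2)
          have hgu : color.getD (cell color.length u) (-2) = c := by rw [← gI_inr hku_inr]; exact hcu
          have hkne : cell color.length u ≠ cell color.length v := by
            intro h; rw [h, hcell] at hgu; exact hcne1 hgu.symm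
          have hgu1 : (sI color v (xor1 c)).getD (cell color.length u) (-2) = c := by
            rw [hset]; rw [getD_set_ne (Ne.symm hkne)]; exact hgu
          have hlen12 : r1.2.length = color.length := by rw [hLa, hlen1]
          have hcu2 : gI r1.2 u = c := by
            have h2 : PySem.Raise.InRange r1.2.length u := by rw [hlen12]; exact hku_inr
            rw [gI_inr h2, hlen12]
            rw [hMa _ (by rw [hgu1]; exact hcne1), hgu1]
          have hcont := IH r1.2 c u p S (b - ((sI color v (xor1 c)).count (-1) - r1.2.count (-1)))
            (by rw [hlen12]; exact hlen) hVa hc hcu2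
            (fun x hx' => hrest x (List.mem_cons_of_mem _ hx'))
            (by omega) (by omega)
          rw [hcont]
          -- the second child (continuation) and its count bound
          obtain ⟨hLc, hMc, _⟩ := dfsProps adj (a + 1) rest' r1.2 c u p hVa hc
          have hcnt3 : (dfsLoop adj (a + 1) r1.2 rest' c u p).2.count (-1) ≤ r1.2.count (-1) :=
            count_le_of_mono hLc hMc
          have harith :
              b - ((sI color v (xor1 c)).count (-1) - r1.2.count (-1)) -
                (r1.2.count (-1) - (dfsLoop adj (a + 1) r1.2 rest' c u p).2.count (-1)) =
              b + 1 - (color.count (-1) - (dfsLoop adj (a + 1) r1.2 rest' c u p).2.count (-1)) := by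
            omega
          rw [harith]
        · rw [if_neg hr1, if_neg hr1, if_neg hr1]
      · -- v already coloured
        have hvinr : PySem.Raise.InRange n v := hrest v List.mem_cons_self
        have hvinr' : PySem.Raise.InRange color.length v := by rw [hlen]; exact hvinr
        have hvmem : gI color v ∈ color := by
          rw [gI_inr hvinr']; exact getD_mem (cell_lt hvinr') _
        have hval01 : gI color v = 0 ∨ gI color v = 1 := by
          rcases hvals _ hvmem with h | h | h
          · exact absurd h hcv
          · exact Or.inl h
          · exact Or.inr h
        by_cases hvc : gI color v = c
        · -- conflict: same colour at both ends
          have hAne : gI color v ≠ xor1 c := by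
            rw [hvc]; rcases hc with h | h <;> subst h <;> decide
          have hL : loopB adj fB color ((u, p, v :: rest') :: S) = none := by
            cases fB with
            | zero => rw [loopB.eq_3, if_neg hvp, if_neg hcv, if_pos (by rw [hcu]; exact hvc)]
            | succ f => rw [loopB.eq_4, if_neg hvp, if_neg hcv, if_pos (by rw [hcu]; exact hvc)]
          have hR : dfsLoop adj fA color (v :: rest') c u p = (false, color) := by
            cases fA with
            | zero => rw [dfsLoop_cons_zero, if_neg hvp, if_neg hcv, if_pos hAne]
            | succ f => rw [dfsLoop_cons_succ, if_neg hvp, if_neg hcv, if_pos hAne]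
          rw [hL, hR]
          simp
        · -- correctly coloured: both move on
          have hvx : gI color v = xor1 c := by
            rcases hc with h | h <;> subst h <;> rcases hval01 with h2 | h2 <;> rw [h2] <;>
              first
              | decide
              | (exfalso; apply hvc; rw [h2])
          have hL : loopB adj fB color ((u, p, v :: rest') :: S) =
              loopB adj fB color ((u, p, rest') :: S) := by
            cases fB with
            | zero =>
              rw [loopB.eq_3, if_neg hvp, if_neg hcv, if_neg (by rw [hcu]; exact hvc)]
            | succ f =>
              rw [loopB.eq_4, if_neg hvp, if_neg hcv, if_neg (by rw [hcu]; exact hvc)]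
          have hR : dfsLoop adj fA color (v :: rest') c u p = dfsLoop adj fA color rest' c u p := by
            cases fA with
            | zero => rw [dfsLoop_cons_zero, if_neg hvp, if_neg hcv, if_neg (not_not_intro hvx)]
            | succ f => rw [dfsLoop_cons_succ, if_neg hvp, if_neg hcv, if_neg (not_not_intro hvx)]
          rw [hL, hR]
          exact IH color c u p S fB hlen hvals hc hcu
            (fun x hx' => hrest x (List.mem_cons_of_mem _ hx')) hA hB

theorem phase1_eq (adj : List (List Int)) (n : Nat)
    (hadj : ∀ l ∈ adj, ∀ x ∈ l, PySem.Raise.InRange n x) :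
    ∀ (roots : List Int) (color : List Int),
    color.length = n → (∀ x ∈ color, x = -1 ∨ x = 0 ∨ x = 1) →
    phase1A adj (n + 1) roots color = phase1B adj (n + 1) roots color := by
  intro roots
  induction roots with
  | nil => intro color _ _; rfl
  | cons s ss IH =>
    intro color hlen hvals
    rw [phase1A, phase1B]
    by_cases hs : gI color s = -1
    · rw [if_pos hs, if_neg (not_not_intro hs)]
      have hinr : PySem.Raise.InRange color.length s := gI_inr_of_ne (by rw [hs]; decide)
      have hset : sI color s 0 = color.set (cell color.length s) 0 := sI_inr hinr
      have hvals0 : ∀ x ∈ sI color s 0, x = -1 ∨ x = 0 ∨ x = 1 := by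
        intro x hx'
        rw [hset] at hx'
        rcases List.mem_or_eq_of_mem_set hx' with h | h
        · exact hvals x h
        · subst h; simp
      have hlen0 : (sI color s 0).length = n := by rw [hset]; simpa using hlen
      have hcu0 : gI (sI color s 0) s = 0 := by rw [hset]; exact gI_set_self hinr _
      have hrest0 : ∀ x ∈ gL adj s, PySem.Raise.InRange n x := by
        by_cases hav : PySem.Raise.InRange adj.length s
        · exact fun x hx' => hadj _ (gL_inr hav) x hx'
        · rw [gL_ninr hav]; intro x hx'; cases hx'
      have hcnt : (sI color s 0).count (-1) ≤ n + 1 := by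
        have := List.count_le_length (a := (-1 : Int)) (l := sI color s 0)
        omega
      have hsim := sim adj n hadj (n + 1) (gL adj s) (sI color s 0) 0 s (-1) [] (n + 1)
        hlen0 hvals0 (Or.inl rfl) hcu0 hrest0 hcnt hcnt
      rw [hsim]
      by_cases hr : (dfsLoop adj (n + 1) (sI color s 0) (gL adj s) 0 s (-1)).1
      · rw [if_pos hr, if_pos hr, loopB.eq_1]
        show phase1A adj (n + 1) ss (dfsLoop adj (n + 1) (sI color s 0) (gL adj s) 0 s (-1)).2 =
          phase1B adj (n + 1) ss (dfsLoop adj (n + 1) (sI color s 0) (gL adj s) 0 s (-1)).2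
        obtain ⟨hL, _, hV⟩ :=
          dfsProps adj (n + 1) (gL adj s) (sI color s 0) 0 s (-1) hvals0 (Or.inl rfl)
        exact IH _ (by rw [hL]; exact hlen0) hV
      · rw [if_neg hr, if_neg hr]
    · rw [if_neg hs, if_pos hs]
      exact IH color hlen hvals

theorem pySetD_cases {α : Type} (xs : List α) (i : Int) (v : α) :
    PySem.List.pySetD xs i v = xs ∨
      ∃ k, k < xs.length ∧ PySem.List.pySetD xs i v = xs.set k v := by
  unfold PySem.List.pySetD PySem.List.pySet?
  by_cases h : PySem.Raise.InRange xs.length i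
  · right; exact ⟨cell xs.length i, cell_lt h, by rw [pyIdx?_inr h]; rfl⟩
  · left; rw [pyIdx?_ninr h]; rfl

theorem adjStep {N : Int} {acc : List (List Int)}
    (hacc : ∀ l ∈ acc, ∀ x ∈ l, PySem.Raise.InRange N.toNat x)
    {i val : Int} (hval : PySem.Raise.InRange N.toNat val) :
    ∀ l ∈ sL acc i (gL acc i ++ [val]), ∀ x ∈ l, PySem.Raise.InRange N.toNat x := by
  intro l hl x hx
  unfold sL at hl
  rcases pySetD_cases acc i (gL acc i ++ [val]) with h | ⟨k, _, h⟩
  · rw [h] at hl; exact hacc l hl x hx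
  · rw [h] at hl
    rcases List.mem_or_eq_of_mem_set hl with h2 | h2
    · exact hacc l h2 x hx
    · subst h2
      rcases List.mem_append.mp hx with h3 | h3
      · have hgl : gL acc i ∈ acc ∨ gL acc i = [] := by
          by_cases hi : PySem.Raise.InRange acc.length i
          · exact Or.inl (gL_inr hi)
          · exact Or.inr (gL_ninr hi)
        rcases hgl with h4 | h4
        · exact hacc _ h4 x h3
        · rw [h4] at h3; cases h3
      · rw [List.mem_singleton] at h3; subst h3; exact hval

theorem adjBuild_inr (N : Int) (edges : List (Int × Int × Int)) (h0 : 0 ≤ N)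
    (h : ∀ e ∈ edges, (1 - N ≤ e.2.1 ∧ e.2.1 ≤ N) ∧ (1 - N ≤ e.2.2 ∧ e.2.2 ≤ N)) :
    ∀ l ∈ adjBuild N edges, ∀ x ∈ l, PySem.Raise.InRange N.toNat x := by
  have hN : (N.toNat : Int) = N := Int.toNat_of_nonneg h0
  unfold adjBuild
  have main : ∀ (es : List (Int × Int × Int)) (acc : List (List Int)),
      (∀ e ∈ es, (1 - N ≤ e.2.1 ∧ e.2.1 ≤ N) ∧ (1 - N ≤ e.2.2 ∧ e.2.2 ≤ N)) →
      (∀ l ∈ acc, ∀ x ∈ l, PySem.Raise.InRange N.toNat x) →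
      ∀ l ∈ es.foldl (fun adj e =>
        let adj1 := sL adj (e.2.1 - 1) (gL adj (e.2.1 - 1) ++ [e.2.2 - 1])
        sL adj1 (e.2.2 - 1) (gL adj1 (e.2.2 - 1) ++ [e.2.1 - 1])) acc,
        ∀ x ∈ l, PySem.Raise.InRange N.toNat x := by
    intro es
    induction es with
    | nil => intro acc _ hacc; simpa using hacc
    | cons e es IH =>
      intro acc hes hacc
      rw [List.foldl_cons]
      refine IH _ (fun e' he' => hes e' (List.mem_cons_of_mem _ he')) ?_
      have hb := hes e List.mem_cons_self
      have hu : PySem.Raise.InRange N.toNat (e.2.1 - 1) := by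
        constructor <;> omega
      have hv : PySem.Raise.InRange N.toNat (e.2.2 - 1) := by
        constructor <;> omega
      exact adjStep (adjStep hacc hv) hu
  refine main edges (List.replicate N.toNat []) h ?_
  intro l hl x hx
  rw [List.eq_of_mem_replicate hl] at hx
  cases hx

-- ===== VERDICT (by name: the statement is the Claim_ definition above) =====
theorem solve_spec : Claim_equal_solve := by
  intro N M edges _ hpre
  unfold Spec_solve solve solve_alt
  have hadj : ∀ l ∈ adjBuild N edges, ∀ x ∈ l, PySem.Raise.InRange N.toNat x := by
    by_cases h0 : 0 ≤ N
    · exact adjBuild_inr N edges h0 hpre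
    · have hedges : edges = [] := by
        cases edges with
        | nil => rfl
        | cons e es => exfalso; have := hpre e List.mem_cons_self; omega
      subst hedges
      unfold adjBuild
      rw [List.foldl_nil]
      intro l hl x hx
      rw [List.eq_of_mem_replicate hl] at hx
      cases hx
  rw [phase1_eq (adjBuild N edges) N.toNat hadj
    (PySem.List.pyRange 0 N 1) (List.replicate N.toNat (-1)) (by simp)
    (by intro x hx; left; exact (List.eq_of_mem_replicate hx))]
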